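-- pv_equiv track=rewrite | github.com/bhavya2403/Learning-Python | HackerrankSolutions/ProblemSolving/Algorithms/Implementation/Medium/bomberman_game.py | bomberMan
-- ===== SOURCE A (Python) =====
-- def bomberMan(r, c, n, grid):
--     if n == 1:
--         return grid
--     if n % 4 == 2 or n % 4 == 0:
--         return ['O' * c] * r
--
--     grid1 = []
--     for i in range(r):
--         grid1.append([])
--     for i in range(r):
--         for j in range(c):
--             if grid[i][j] == 'O':
--                 grid1[i] += '.'
--             else:
--                 grid1[i] += 'O'
--
--     exploded = []
--     for i in range(r):
--         for j in range(c):
--             if grid1[i][j] == '.' and (i, j) not in exploded: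
--                 if i - 1 >= 0:
--                     if grid1[i - 1][j] == 'O':
--                         grid1[i - 1][j] = '.'
--                         exploded.append((i - 1, j))
--                 if i + 1 < r:
--                     if grid1[i + 1][j] == 'O':
--                         grid1[i + 1][j] = '.'
--                         exploded.append((i + 1, j))
--                 if j - 1 >= 0:
--                     if grid1[i][j - 1] == 'O':
--                         grid1[i][j - 1] = '.'
--                         exploded.append((i, j - 1))
--                 if j + 1 < c:
--                     if grid1[i][j + 1] == 'O':
--                         grid1[i][j + 1] = '.'
--                         exploded.append((i, j + 1))
--     if n % 4 == 3:
--         for i in range(r):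
--             s = ''
--             for j in range(c):
--                 s += grid1[i][j]
--             grid1[i] = s
--         return grid1
--
--     grid2 = []
--     for i in range(r):
--         grid2.append([])
--     for i in range(r):
--         for j in range(c):
--             if grid1[i][j] == 'O':
--                 grid2[i] += '.'
--             else:
--                 grid2[i] += 'O'
--
--     exploded = []
--     for i in range(r):
--         for j in range(c):
--             if grid2[i][j] == '.' and (i, j) not in exploded:
--                 if i - 1 >= 0:
--                     if grid2[i - 1][j] == 'O':
--                         grid2[i - 1][j] = '.'
--                         exploded.append((i - 1, j))
--                 if i + 1 < r:
--                     if grid2[i + 1][j] == 'O':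
--                         grid2[i + 1][j] = '.'
--                         exploded.append((i + 1, j))
--                 if j - 1 >= 0:
--                     if grid2[i][j - 1] == 'O':
--                         grid2[i][j - 1] = '.'
--                         exploded.append((i, j - 1))
--                 if j + 1 < c:
--                     if grid2[i][j + 1] == 'O':
--                         grid2[i][j + 1] = '.'
--                         exploded.append((i, j + 1))
--
--     for i in range(r):
--         s = ''
--         for j in range(c):
--             s += grid2[i][j]
--         grid2[i] = s
--     return grid2
-- ===== SOURCE B (Python) =====
-- def bomberMan(r, c, n, grid):
--     if n == 1:
--         return grid
--     if n % 4 in (0, 2):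
--         return ['O' * c] * r
--
--     def step(g):
--         def safe(i, j):
--             if g[i][j] == 'O':
--                 return False
--             if i > 0 and g[i - 1][j] == 'O':
--                 return False
--             if i + 1 < r and g[i + 1][j] == 'O':
--                 return False
--             if j > 0 and g[i][j - 1] == 'O':
--                 return False
--             if j + 1 < c and g[i][j + 1] == 'O':
--                 return False
--             return True
--         return [''.join('O' if safe(i, j) else '.' for j in range(c)) for i in range(r)]
--
--     return step(grid) if n % 4 == 3 else step(step(grid))
-- ===== Notes on version B (the rewrite author's own statement) =====
-- stated objective: simpler
-- what changed: A inverts the grid into mutable row lists and then mutates them with an 'exploded' seen-list scan (membership-tested per cell) before joining back to strings; B computes each detonation step as one pure forward pass that writes cell (i,j) as 'O' exactly when the old cell and its in-bounds orthogonal neighbours are all bomb-free, with no mutation and no exploded list.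
-- outside the precondition, e.g. on bomberMan(2, 2, 3, ['O.']): A raises IndexError, B raises IndexError
import Mathlib
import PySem

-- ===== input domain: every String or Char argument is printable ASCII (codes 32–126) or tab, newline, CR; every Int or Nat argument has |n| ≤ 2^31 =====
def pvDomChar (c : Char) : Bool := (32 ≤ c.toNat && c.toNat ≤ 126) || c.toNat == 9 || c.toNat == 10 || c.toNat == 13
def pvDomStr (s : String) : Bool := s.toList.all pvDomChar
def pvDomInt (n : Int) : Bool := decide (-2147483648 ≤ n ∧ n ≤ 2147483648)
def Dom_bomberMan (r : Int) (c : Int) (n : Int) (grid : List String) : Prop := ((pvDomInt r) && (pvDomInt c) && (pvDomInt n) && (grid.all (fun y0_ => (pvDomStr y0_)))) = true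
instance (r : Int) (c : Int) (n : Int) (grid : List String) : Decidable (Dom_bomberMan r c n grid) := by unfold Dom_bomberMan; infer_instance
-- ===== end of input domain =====

-- B replaces A's invert-then-mutate simulation (mutable row lists plus an 'exploded'
-- seen-list) by a pure one-pass formula per detonation step; objective: simpler.

-- ===== PORT A =====
-- grid[i][j] on strings / list-of-list cells; total via defaults, exact under Pre_ (indices in range).
def rowCh (grid : List String) (i j : Int) : Char :=
  PySem.List.pyGetD (PySem.List.pyGetD grid i "").toList j ' '

def cellC (g : List (List Char)) (i j : Int) : Char :=
  PySem.List.pyGetD (PySem.List.pyGetD g i []) j ' '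

-- grid1[i] += ch
def appendAt (g : List (List Char)) (i : Int) (ch : Char) : List (List Char) :=
  PySem.List.pySetD g i (PySem.List.pyGetD g i [] ++ [ch])

-- grid1[i][j] = ch
def setCell (g : List (List Char)) (i j : Int) (ch : Char) : List (List Char) :=
  PySem.List.pySetD g i (PySem.List.pySetD (PySem.List.pyGetD g i []) j ch)

-- A's inversion block: r appends of an empty row, then the nested fill loop
-- (used twice in A, reading grid resp. grid1 through the accessor f).
def invertGrid (r c : Int) (f : Int → Int → Char) : List (List Char) :=
  let g := (PySem.List.pyRange 0 r 1).foldl (fun g _ => g ++ [([] : List Char)]) []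
  (PySem.List.pyRange 0 r 1).foldl (fun g i =>
    (PySem.List.pyRange 0 c 1).foldl (fun g j =>
      if f i j = 'O' then appendAt g i '.' else appendAt g i 'O') g) g

-- one of the four identical neighbour blocks (the bounds test stays at the call site)
def touch (st : List (List Char) × List (Int × Int)) (q : Int × Int) :
    List (List Char) × List (Int × Int) :=
  if cellC st.1 q.1 q.2 = 'O' then (setCell st.1 q.1 q.2 '.', st.2 ++ [q]) else st

def explodeStep (r c : Int) (st : List (List Char) × List (Int × Int)) (i j : Int) :
    List (List Char) × List (Int × Int) :=
  if cellC st.1 i j = '.' ∧ (i, j) ∉ st.2 then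
    let st := if 0 ≤ i - 1 then touch st (i - 1, j) else st
    let st := if i + 1 < r then touch st (i + 1, j) else st
    let st := if 0 ≤ j - 1 then touch st (i, j - 1) else st
    let st := if j + 1 < c then touch st (i, j + 1) else st
    st
  else st

-- A's explosion double loop with its 'exploded' list, returning the mutated grid
def explodeAll (r c : Int) (g : List (List Char)) : List (List Char) :=
  ((PySem.List.pyRange 0 r 1).foldl (fun st i =>
    (PySem.List.pyRange 0 c 1).foldl (fun st j => explodeStep r c st i j) st)
    (g, ([] : List (Int × Int)))).1

-- A's final block: row i replaced by the string built with s += grid1[i][j]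
def rowsToStrings (r c : Int) (g : List (List Char)) : List String :=
  (PySem.List.pyRange 0 r 1).foldl (fun out i =>
    out ++ [String.ofList ((PySem.List.pyRange 0 c 1).foldl (fun s j => s ++ [cellC g i j]) [])]) []

def bomberMan (r : Int) (c : Int) (n : Int) (grid : List String) : List String :=
  if n = 1 then grid
  else if PySem.Int.mod n 4 = 2 ∨ PySem.Int.mod n 4 = 0 then
    List.replicate r.toNat (String.ofList (List.replicate c.toNat 'O'))
  else
    let grid1 := invertGrid r c (fun i j => rowCh grid i j)
    let grid1 := explodeAll r c grid1
    if PySem.Int.mod n 4 = 3 then rowsToStrings r c grid1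
    else
      let grid2 := invertGrid r c (fun i j => cellC grid1 i j)
      let grid2 := explodeAll r c grid2
      rowsToStrings r c grid2

-- ===== PORT B =====
def cellS (g : List String) (i j : Int) : Char :=
  PySem.List.pyGetD (PySem.List.pyGetD g i "").toList j ' '

def safeB (r c : Int) (g : List String) (i j : Int) : Bool :=
  if cellS g i j = 'O' then false
  else if 0 < i ∧ cellS g (i - 1) j = 'O' then false
  else if i + 1 < r ∧ cellS g (i + 1) j = 'O' then false
  else if 0 < j ∧ cellS g i (j - 1) = 'O' then false
  else if j + 1 < c ∧ cellS g i (j + 1) = 'O' then false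
  else true

def stepB (r c : Int) (g : List String) : List String :=
  (PySem.List.pyRange 0 r 1).map (fun i =>
    String.ofList ((PySem.List.pyRange 0 c 1).map (fun j => if safeB r c g i j then 'O' else '.')))

def bomberMan_alt (r : Int) (c : Int) (n : Int) (grid : List String) : List String :=
  if n = 1 then grid
  else if PySem.Int.mod n 4 = 0 ∨ PySem.Int.mod n 4 = 2 then
    List.replicate r.toNat (String.ofList (List.replicate c.toNat 'O'))
  else if PySem.Int.mod n 4 = 3 then stepB r c grid
  else stepB r c (stepB r c grid)

-- ===== PRECONDITION & SPEC =====
-- A raises IndexError (grid[i][j]) exactly when the explosion branch is reached with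
-- 0 < c and the grid missing one of the first r rows or a row shorter than c.
def Pre_bomberMan (r : Int) (c : Int) (n : Int) (grid : List String) : Prop :=
  n = 1 ∨ PySem.Int.mod n 4 = 0 ∨ PySem.Int.mod n 4 = 2 ∨ c ≤ 0 ∨
    (r.toNat ≤ grid.length ∧ ∀ s ∈ grid.take r.toNat, c.toNat ≤ s.toList.length)
instance (r : Int) (c : Int) (n : Int) (grid : List String) : Decidable (Pre_bomberMan r c n grid) := by unfold Pre_bomberMan; infer_instance

def pvWitness_bomberMan : Int × Int × Int × List String := (3, 3, 7, ["O..", ".O.", "..."])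

def Spec_bomberMan (r : Int) (c : Int) (n : Int) (grid : List String) (out : List String) : Prop := out = bomberMan_alt r c n grid
instance (r : Int) (c : Int) (n : Int) (grid : List String) (out : List String) : Decidable (Spec_bomberMan r c n grid out) := by unfold Spec_bomberMan; infer_instance

-- ===== CLAIM (what is proved, stated in full; the proofs are below) =====
def Claim_equal_bomberMan : Prop := ∀ (r : Int) (c : Int) (n : Int) (grid : List String), Dom_bomberMan r c n grid → Pre_bomberMan r c n grid → Spec_bomberMan r c n grid (bomberMan r c n grid)



-- ===== LEMMAS AND PROOFS =====

-- abstract grid of shape r × c given by a cell function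
def gridOf (r c : Int) (h : Int → Int → Char) : List (List Char) :=
  (PySem.List.pyRange 0 r 1).map (fun i => (PySem.List.pyRange 0 c 1).map (h i))

def nbrs (p : Int × Int) : List (Int × Int) :=
  [(p.1 - 1, p.2), (p.1 + 1, p.2), (p.1, p.2 - 1), (p.1, p.2 + 1)]

def inB (r c : Int) (p : Int × Int) : Prop := 0 ≤ p.1 ∧ p.1 < r ∧ 0 ≤ p.2 ∧ p.2 < c

def inBb (r c : Int) (p : Int × Int) : Bool :=
  decide (0 ≤ p.1) && decide (p.1 < r) && decide (0 ≤ p.2) && decide (p.2 < c)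

-- grid state during A's explosion scan, determined by the exploded list
def FF (inv : Int → Int → Char) (ex : List (Int × Int)) : Int → Int → Char :=
  fun i j => if inv i j = '.' ∨ (i, j) ∈ ex then '.' else 'O'

-- "cell (i,j) or an in-bounds orthogonal neighbour holds a bomb"
def boomB (r c : Int) (f : Int → Int → Char) (i j : Int) : Bool :=
  decide (f i j = 'O') || (nbrs (i, j)).any (fun x => inBb r c x && decide (f x.1 x.2 = 'O'))

def cells (r c : Int) : List (Int × Int) :=
  (PySem.List.pyRange 0 r 1).flatMap (fun i => (PySem.List.pyRange 0 c 1).map (fun j => (i, j)))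

lemma mem_nbrs_comm (p x : Int × Int) : x ∈ nbrs p ↔ p ∈ nbrs x := by
  obtain ⟨a, b⟩ := p; obtain ⟨u, v⟩ := x
  simp only [nbrs, List.mem_cons, List.not_mem_nil, or_false, Prod.mk.injEq]
  omega

lemma mem_cells (r c : Int) (p : Int × Int) : p ∈ cells r c ↔ inB r c p := by
  obtain ⟨a, b⟩ := p
  simp only [cells, List.mem_flatMap, List.mem_map, PySem.List.mem_pyRange_one, inB,
    Prod.mk.injEq]
  constructor
  · rintro ⟨i, hi, j, hj, rfl, rfl⟩; exact ⟨hi.1, hi.2, hj.1, hj.2⟩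
  · rintro ⟨h1, h2, h3, h4⟩; exact ⟨a, ⟨h1, h2⟩, b, ⟨h3, h4⟩, rfl, rfl⟩

lemma inBb_iff (r c : Int) (p : Int × Int) : inBb r c p = true ↔ inB r c p := by
  simp only [inBb, Bool.and_eq_true, decide_eq_true_eq, inB]
  tauto

lemma boomB_iff (r c : Int) (f : Int → Int → Char) (i j : Int) :
    boomB r c f i j = true ↔
      (f i j = 'O' ∨ ∃ x ∈ nbrs (i, j), inB r c x ∧ f x.1 x.2 = 'O') := by
  simp [boomB, List.any_eq_true, inBb_iff]

lemma gridOf_congr (r c : Int) (h h' : Int → Int → Char)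
    (H : ∀ i j, 0 ≤ i → i < r → 0 ≤ j → j < c → h i j = h' i j) :
    gridOf r c h = gridOf r c h' := by
  unfold gridOf
  apply List.map_congr_left
  intro i hi
  rw [PySem.List.mem_pyRange_one] at hi
  apply List.map_congr_left
  intro j hj
  rw [PySem.List.mem_pyRange_one] at hj
  exact H i j hi.1 hi.2 hj.1 hj.2

lemma cellC_gridOf (r c : Int) (h : Int → Int → Char) (i j : Int)
    (h1 : 0 ≤ i) (h2 : i < r) (h3 : 0 ≤ j) (h4 : j < c) :
    cellC (gridOf r c h) i j = h i j := by
  unfold cellC gridOf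
  rw [PySem.List.pyGetD_map_pyRange_of_nonneg _ r i [] h1 h2,
    PySem.List.pyGetD_map_pyRange_of_nonneg _ c j ' ' h3 h4]

lemma set_map_pyRange {α : Type} (r : Int) (F : Int → α) (a : Int)
    (h0 : 0 ≤ a) (_ha : a < r) (v : α) :
    ((PySem.List.pyRange 0 r 1).map F).set a.toNat v
      = (PySem.List.pyRange 0 r 1).map (fun i => if i = a then v else F i) := by
  apply List.ext_getElem
  · simp
  intro k hk1 hk2
  have hk : k < (r - 0).toNat := by
    simpa [PySem.List.length_pyRange_one] using hk2
  simp only [List.getElem_set, List.getElem_map, PySem.List.getElem_pyRange_one]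
  by_cases hak : a.toNat = k
  · rw [if_pos hak, if_pos (by omega)]
  · rw [if_neg hak, if_neg (by omega)]

lemma setCell_gridOf (r c : Int) (h : Int → Int → Char) (a b : Int)
    (h1 : 0 ≤ a) (h2 : a < r) (h3 : 0 ≤ b) (h4 : b < c) (ch : Char) :
    setCell (gridOf r c h) a b ch
      = gridOf r c (fun i j => if i = a ∧ j = b then ch else h i j) := by
  unfold setCell
  have hrow : PySem.List.pyGetD (gridOf r c h) a [] = (PySem.List.pyRange 0 c 1).map (h a) :=
    PySem.List.pyGetD_map_pyRange_of_nonneg _ r a [] h1 h2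
  rw [hrow, PySem.List.pySetD_of_nonneg _ _ h3, PySem.List.pySetD_of_nonneg _ _ h1,
    set_map_pyRange c (h a) b h3 h4 ch]
  show (gridOf r c h).set a.toNat _ = _
  unfold gridOf
  rw [set_map_pyRange r _ a h1 h2 _]
  apply List.map_congr_left
  intro i hi
  rw [PySem.List.mem_pyRange_one] at hi
  by_cases hia : i = a
  · rw [if_pos hia]
    apply List.map_congr_left
    intro j hj
    by_cases hjb : j = b
    · simp [hia, hjb]
    · simp [hia, hjb]
  · rw [if_neg hia]
    apply List.map_congr_left
    intro j hj
    simp [hia]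

lemma foldl_flatMap {α β σ : Type} (L : List α) (G : α → List β)
    (F : σ → β → σ) (init : σ) :
    (L.flatMap G).foldl F init = L.foldl (fun st a => (G a).foldl F st) init := by
  induction L generalizing init with
  | nil => rfl
  | cons a t ih => simp [List.flatMap_cons, List.foldl_append, ih]

lemma explodeAll_cells (r c : Int) (g : List (List Char)) :
    explodeAll r c g
      = ((cells r c).foldl (fun st p => explodeStep r c st p.1 p.2)
          (g, ([] : List (Int × Int)))).1 := by
  unfold explodeAll cells
  rw [foldl_flatMap]
  simp only [List.foldl_map]

lemma appendAt_eq (g : List (List Char)) (i : Int) (x : Char)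
    (h0 : 0 ≤ i) (hlen : i.toNat < g.length) :
    appendAt g i x = g.set i.toNat (g[i.toNat] ++ [x]) := by
  have hlt : i < (g.length : Int) := by omega
  unfold appendAt
  rw [PySem.List.pySetD_of_nonneg _ _ h0,
    PySem.List.pyGetD_eq_getElem _ _ h0 (by simpa [PySem.List.len_eq] using hlt)]

lemma foldl_appendAt (L : List Int) (i : Int) (ch : Int → Char)
    (h0 : 0 ≤ i) (g : List (List Char)) (hlen : i.toNat < g.length) :
    L.foldl (fun g j => appendAt g i (ch j)) g
      = g.set i.toNat (g[i.toNat] ++ L.map ch) := by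
  induction L generalizing g with
  | nil => simp
  | cons a t ih =>
    simp only [List.foldl_cons]
    rw [appendAt_eq g i (ch a) h0 hlen, ih (g.set i.toNat (g[i.toNat] ++ [ch a]))
      (by simpa using hlen)]
    rw [List.set_set]
    simp

theorem fill_outer (r c : Int) (f : Int → Int → Char) (a : Int) (h0 : 0 ≤ a) :
    (PySem.List.pyRange a r 1).foldl
      (fun g i => (PySem.List.pyRange 0 c 1).foldl
        (fun g j => if f i j = 'O' then appendAt g i '.' else appendAt g i 'O') g)
      ((PySem.List.pyRange 0 r 1).map (fun i =>
        if i < a then (PySem.List.pyRange 0 c 1).map (fun j => if f i j = 'O' then '.' else 'O')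
        else []))
    = gridOf r c (fun i j => if f i j = 'O' then '.' else 'O') := by
  by_cases har : r ≤ a
  · rw [PySem.List.pyRange_one_eq_nil har]
    unfold gridOf
    simp only [List.foldl_nil]
    apply List.map_congr_left
    intro i hi
    rw [PySem.List.mem_pyRange_one] at hi
    rw [if_pos (by omega)]
  · rw [PySem.List.pyRange_one_cons (a := a) (b := r) (by omega)]
    simp only [List.foldl_cons]
    have hbody : (fun (g : List (List Char)) j =>
        if f a j = 'O' then appendAt g a '.' else appendAt g a 'O')
        = fun g j => appendAt g a (if f a j = 'O' then '.' else 'O') := by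
      funext g j
      exact (apply_ite (appendAt g a) _ _ _).symm
    rw [hbody]
    have hlen : a.toNat < ((PySem.List.pyRange 0 r 1).map (fun i =>
        if i < a then (PySem.List.pyRange 0 c 1).map (fun j => if f i j = 'O' then '.' else 'O')
        else [])).length := by
      simp [PySem.List.length_pyRange_one]; omega
    rw [foldl_appendAt _ a _ h0 _ hlen]
    have hrowval : ((PySem.List.pyRange 0 r 1).map (fun i =>
        if i < a then (PySem.List.pyRange 0 c 1).map (fun j => if f i j = 'O' then '.' else 'O')
        else []))[a.toNat]'hlen = [] := by
      simp only [List.getElem_map, PySem.List.getElem_pyRange_one]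
      rw [if_neg (by omega)]
    rw [hrowval, List.nil_append, set_map_pyRange r _ a h0 (by omega)]
    have hmid : ((PySem.List.pyRange 0 r 1).map (fun i =>
        if i = a then (PySem.List.pyRange 0 c 1).map (fun j => if f a j = 'O' then '.' else 'O')
        else if i < a then (PySem.List.pyRange 0 c 1).map (fun j => if f i j = 'O' then '.' else 'O')
        else []))
        = (PySem.List.pyRange 0 r 1).map (fun i =>
          if i < a + 1 then (PySem.List.pyRange 0 c 1).map (fun j => if f i j = 'O' then '.' else 'O')
          else []) := by
      apply List.map_congr_left
      intro i hi
      by_cases hia : i = a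
      · subst hia
        rw [if_pos rfl, if_pos (by omega)]
      · rw [if_neg hia]
        by_cases hlt : i < a
        · rw [if_pos hlt, if_pos (by omega)]
        · rw [if_neg hlt, if_neg (by omega)]
    rw [hmid]
    exact fill_outer r c f (a + 1) (by omega)
termination_by (r - a).toNat
decreasing_by omega

lemma invertGrid_eq (r c : Int) (f : Int → Int → Char) :
    invertGrid r c f = gridOf r c (fun i j => if f i j = 'O' then '.' else 'O') := by
  unfold invertGrid
  have hinit : (PySem.List.pyRange 0 r 1).foldl
      (fun (g : List (List Char)) _ => g ++ [([] : List Char)]) []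
      = (PySem.List.pyRange 0 r 1).map (fun i =>
        if i < (0 : Int) then (PySem.List.pyRange 0 c 1).map (fun j => if f i j = 'O' then '.' else 'O')
        else []) := by
    rw [PySem.List.foldl_append_singleton_eq_map
      (f := fun (_ : Int) => ([] : List Char))]
    simp only [List.nil_append]
    apply List.map_congr_left
    intro i hi
    rw [PySem.List.mem_pyRange_one] at hi
    rw [if_neg (by omega)]
  rw [hinit]
  exact fill_outer r c f 0 le_rfl

lemma touch_spec (r c : Int) (inv : Int → Int → Char) (g : List (List Char))
    (ex : List (Int × Int)) (q : Int × Int) (hq : inB r c q)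
    (hg : g = gridOf r c (FF inv ex)) :
    (touch (g, ex) q).1 = gridOf r c (FF inv (touch (g, ex) q).2) ∧
    ∀ x, x ∈ (touch (g, ex) q).2 ↔
      x ∈ ex ∨ (x = q ∧ inv q.1 q.2 ≠ '.' ∧ q ∉ ex) := by
  obtain ⟨hq1, hq2, hq3, hq4⟩ := hq
  have hcell : cellC g q.1 q.2 = FF inv ex q.1 q.2 := by
    rw [hg]; exact cellC_gridOf r c _ q.1 q.2 hq1 hq2 hq3 hq4
  unfold touch
  by_cases hO : cellC g q.1 q.2 = 'O'
  · have hnot : ¬(inv q.1 q.2 = '.' ∨ (q.1, q.2) ∈ ex) := by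
      intro hcon
      rw [hcell] at hO
      unfold FF at hO
      rw [if_pos hcon] at hO
      exact absurd hO (by decide)
    have hnd : inv q.1 q.2 ≠ '.' := fun h => hnot (Or.inl h)
    have hnm : (q.1, q.2) ∉ ex := fun h => hnot (Or.inr h)
    rw [if_pos hO]
    dsimp only
    constructor
    · rw [hg, setCell_gridOf r c _ q.1 q.2 hq1 hq2 hq3 hq4 '.']
      apply gridOf_congr
      intro i j hi1 hi2 hj1 hj2
      have hmm : ((i, j) ∈ ex ++ [q]) ↔ ((i, j) = q ∨ (i, j) ∈ ex) := by
        simp only [List.mem_append, List.mem_cons, List.not_mem_nil, or_false]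
        tauto
      unfold FF
      by_cases hij : i = q.1 ∧ j = q.2
      · rw [if_pos hij,
          if_pos (Or.inr (hmm.mpr (Or.inl (show (i, j) = q by rw [hij.1, hij.2]))))]
      · rw [if_neg hij]
        by_cases hP : inv i j = '.' ∨ (i, j) ∈ ex
        · rw [if_pos hP,
            if_pos (hP.imp id (fun h => hmm.mpr (Or.inr h)))]
        · rw [if_neg hP, if_neg (by
            rintro (h | h)
            · exact hP (Or.inl h)
            · rcases hmm.mp h with he | h'
              · exact hij ⟨congrArg Prod.fst he, congrArg Prod.snd he⟩
              · exact hP (Or.inr h'))]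
    · intro x
      simp only [List.mem_append, List.mem_cons, List.not_mem_nil, or_false]
      constructor
      · rintro (hx | rfl)
        · exact Or.inl hx
        · exact Or.inr ⟨rfl, hnd, by simpa using hnm⟩
      · rintro (hx | ⟨rfl, _, _⟩)
        · exact Or.inl hx
        · exact Or.inr rfl
  · rw [if_neg hO]
    refine ⟨hg, ?_⟩
    have hor : inv q.1 q.2 = '.' ∨ (q.1, q.2) ∈ ex := by
      by_contra hc
      rw [hcell] at hO
      unfold FF at hO
      rw [if_neg hc] at hO
      exact hO rfl
    intro x
    constructor
    · intro hx; exact Or.inl hx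
    · rintro (hx | ⟨rfl, hnd, hnm⟩)
      · exact hx
      · rcases hor with h | h
        · exact absurd h hnd
        · exact absurd (by simpa using h) hnm

lemma gtouch_spec (r c : Int) (inv : Int → Int → Char)
    (st : List (List Char) × List (Int × Int)) (q : Int × Int)
    (cond : Prop) [Decidable cond] (hcond : cond ↔ inB r c q)
    (hg : st.1 = gridOf r c (FF inv st.2)) :
    (if cond then touch st q else st).1
      = gridOf r c (FF inv (if cond then touch st q else st).2) ∧
    ∀ x, x ∈ (if cond then touch st q else st).2 ↔
      x ∈ st.2 ∨ (x = q ∧ inB r c q ∧ inv q.1 q.2 ≠ '.' ∧ q ∉ st.2) := by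
  by_cases hc : cond
  · rw [if_pos hc]
    have hqb : inB r c q := hcond.mp hc
    obtain ⟨h1, h2⟩ := touch_spec r c inv st.1 st.2 q hqb hg
    refine ⟨h1, fun x => ?_⟩
    rw [h2 x]
    constructor
    · rintro (hx | ⟨rfl, hnd, hnm⟩)
      · exact Or.inl hx
      · exact Or.inr ⟨rfl, hqb, hnd, hnm⟩
    · rintro (hx | ⟨rfl, _, hnd, hnm⟩)
      · exact Or.inl hx
      · exact Or.inr ⟨rfl, hnd, hnm⟩
  · rw [if_neg hc]
    refine ⟨hg, fun x => ?_⟩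
    constructor
    · intro hx; exact Or.inl hx
    · rintro (hx | ⟨rfl, hqb, _, _⟩)
      · exact hx
      · exact absurd (hcond.mpr hqb) hc

set_option maxHeartbeats 1000000 in
lemma step_spec (r c : Int) (inv : Int → Int → Char) (g : List (List Char))
    (ex : List (Int × Int)) (i j : Int)
    (hi1 : 0 ≤ i) (hi2 : i < r) (hj1 : 0 ≤ j) (hj2 : j < c)
    (hg : g = gridOf r c (FF inv ex))
    (hexO : ∀ x ∈ ex, inv x.1 x.2 ≠ '.') :
    (explodeStep r c (g, ex) i j).1
      = gridOf r c (FF inv (explodeStep r c (g, ex) i j).2) ∧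
    (∀ x ∈ (explodeStep r c (g, ex) i j).2, inv x.1 x.2 ≠ '.') ∧
    ∀ x, x ∈ (explodeStep r c (g, ex) i j).2 ↔
      x ∈ ex ∨ (inv i j = '.' ∧ x ∈ nbrs (i, j) ∧ inB r c x ∧ inv x.1 x.2 ≠ '.' ∧ x ∉ ex) := by
  have hcell : cellC g i j = FF inv ex i j := by
    rw [hg]; exact cellC_gridOf r c _ i j hi1 hi2 hj1 hj2
  unfold explodeStep
  dsimp only
  generalize hst1 : (if 0 ≤ i - 1 then touch (g, ex) (i - 1, j) else (g, ex)) = st1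
  generalize hst2 : (if i + 1 < r then touch st1 (i + 1, j) else st1) = st2
  generalize hst3 : (if 0 ≤ j - 1 then touch st2 (i, j - 1) else st2) = st3
  generalize hst4 : (if j + 1 < c then touch st3 (i, j + 1) else st3) = st4
  by_cases hdet : inv i j = '.'
  · have hnm : (i, j) ∉ ex := fun hmem => hexO (i, j) hmem hdet
    have hcond : cellC g i j = '.' ∧ (i, j) ∉ ex := by
      refine ⟨?_, hnm⟩
      rw [hcell]; unfold FF; rw [if_pos (Or.inl hdet)]
    rw [if_pos hcond]
    have h1 := gtouch_spec r c inv (g, ex) (i - 1, j) (0 ≤ i - 1)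
      (by
        constructor
        · intro h; exact ⟨h, by omega, hj1, hj2⟩
        · intro h; exact h.1) hg
    rw [hst1] at h1
    obtain ⟨hg1, hm1⟩ := h1
    have h2 := gtouch_spec r c inv st1 (i + 1, j) (i + 1 < r)
      (by
        constructor
        · intro h; exact ⟨by omega, h, hj1, hj2⟩
        · intro h; exact h.2.1) hg1
    rw [hst2] at h2
    obtain ⟨hg2, hm2⟩ := h2
    have h3 := gtouch_spec r c inv st2 (i, j - 1) (0 ≤ j - 1)
      (by
        constructor
        · intro h; exact ⟨hi1, hi2, h, by omega⟩
        · intro h; exact h.2.2.1) hg2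
    rw [hst3] at h3
    obtain ⟨hg3, hm3⟩ := h3
    have h4 := gtouch_spec r c inv st3 (i, j + 1) (j + 1 < c)
      (by
        constructor
        · intro h; exact ⟨hi1, hi2, by omega, h⟩
        · intro h; exact h.2.2.2) hg3
    rw [hst4] at h4
    obtain ⟨hg4, hm4⟩ := h4
    have hne21 : ((i + 1, j) : Int × Int) ≠ (i - 1, j) := by
      simp only [ne_eq, Prod.mk.injEq, not_and]; omega
    have hne31 : ((i, j - 1) : Int × Int) ≠ (i - 1, j) := by
      simp only [ne_eq, Prod.mk.injEq, not_and]; omega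
    have hne32 : ((i, j - 1) : Int × Int) ≠ (i + 1, j) := by
      simp only [ne_eq, Prod.mk.injEq, not_and]; omega
    have hne41 : ((i, j + 1) : Int × Int) ≠ (i - 1, j) := by
      simp only [ne_eq, Prod.mk.injEq, not_and]; omega
    have hne42 : ((i, j + 1) : Int × Int) ≠ (i + 1, j) := by
      simp only [ne_eq, Prod.mk.injEq, not_and]; omega
    have hne43 : ((i, j + 1) : Int × Int) ≠ (i, j - 1) := by
      simp only [ne_eq, Prod.mk.injEq, not_and]; omega
    have hq2mem : ((i + 1, j) : Int × Int) ∈ st1.2 ↔ (i + 1, j) ∈ ex := by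
      rw [hm1]; simp [hne21]
    have hq3mem : ((i, j - 1) : Int × Int) ∈ st2.2 ↔ (i, j - 1) ∈ ex := by
      rw [hm2, hq2mem, hm1]; simp [hne31, hne32]
    have hq4mem : ((i, j + 1) : Int × Int) ∈ st3.2 ↔ (i, j + 1) ∈ ex := by
      rw [hm3, hq3mem, hm2, hq2mem, hm1]; simp [hne41, hne42, hne43]
    have hmem : ∀ x, x ∈ st4.2 ↔ x ∈ ex ∨
        (x = (i - 1, j) ∧ inB r c (i - 1, j) ∧ inv (i - 1) j ≠ '.' ∧ ((i - 1, j) : Int × Int) ∉ ex) ∨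
        (x = (i + 1, j) ∧ inB r c (i + 1, j) ∧ inv (i + 1) j ≠ '.' ∧ ((i + 1, j) : Int × Int) ∉ ex) ∨
        (x = (i, j - 1) ∧ inB r c (i, j - 1) ∧ inv i (j - 1) ≠ '.' ∧ ((i, j - 1) : Int × Int) ∉ ex) ∨
        (x = (i, j + 1) ∧ inB r c (i, j + 1) ∧ inv i (j + 1) ≠ '.' ∧ ((i, j + 1) : Int × Int) ∉ ex) := by
      intro x
      rw [hm4, hq4mem, hm3, hq3mem, hm2, hq2mem, hm1]
      dsimp only
      simp only [or_assoc]
    refine ⟨hg4, ?_, ?_⟩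
    · intro x hx
      rcases (hmem x).mp hx with hx' | h' | h' | h' | h'
      · exact hexO x hx'
      all_goals (obtain ⟨rfl, _, hne, _⟩ := h'; exact hne)
    · intro x
      rw [hmem x]
      have hnbrs : x ∈ nbrs (i, j) ↔
          x = (i - 1, j) ∨ x = (i + 1, j) ∨ x = (i, j - 1) ∨ x = (i, j + 1) := by
        simp [nbrs]
      constructor
      · rintro (hx | h' | h' | h' | h')
        · exact Or.inl hx
        all_goals
          obtain ⟨rfl, hb, hne, hnm'⟩ := h'
          exact Or.inr ⟨hdet, by simp [nbrs], hb, hne, hnm'⟩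
      · rintro (hx | ⟨_, hnb, hb, hne, hnm'⟩)
        · exact Or.inl hx
        · rw [hnbrs] at hnb
          rcases hnb with rfl | rfl | rfl | rfl
          · exact Or.inr (Or.inl ⟨rfl, hb, hne, hnm'⟩)
          · exact Or.inr (Or.inr (Or.inl ⟨rfl, hb, hne, hnm'⟩))
          · exact Or.inr (Or.inr (Or.inr (Or.inl ⟨rfl, hb, hne, hnm'⟩)))
          · exact Or.inr (Or.inr (Or.inr (Or.inr ⟨rfl, hb, hne, hnm'⟩)))
  · have hncond : ¬(cellC g i j = '.' ∧ (i, j) ∉ ex) := by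
      rintro ⟨hc', hnm⟩
      rw [hcell] at hc'
      unfold FF at hc'
      rw [if_neg (by
        rintro (h | h)
        · exact hdet h
        · exact hnm h)] at hc'
      exact absurd hc' (by decide)
    rw [if_neg hncond]
    dsimp only
    refine ⟨hg, hexO, fun x => ?_⟩
    constructor
    · intro hx; exact Or.inl hx
    · rintro (hx | ⟨hd, _⟩)
      · exact hx
      · exact absurd hd hdet

lemma fold_cells (r c : Int) (inv : Int → Int → Char) (L : List (Int × Int))
    (g : List (List Char)) (ex : List (Int × Int))
    (hg : g = gridOf r c (FF inv ex)) (hexO : ∀ x ∈ ex, inv x.1 x.2 ≠ '.') :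
    (∀ p ∈ L, inB r c p) →
    (L.foldl (fun st p => explodeStep r c st p.1 p.2) (g, ex)).1
      = gridOf r c (FF inv (L.foldl (fun st p => explodeStep r c st p.1 p.2) (g, ex)).2) ∧
    ∀ x, x ∈ (L.foldl (fun st p => explodeStep r c st p.1 p.2) (g, ex)).2 ↔
      x ∈ ex ∨ ∃ p ∈ L, inv p.1 p.2 = '.' ∧ x ∈ nbrs p ∧ inB r c x ∧ inv x.1 x.2 ≠ '.' := by
  induction L generalizing g ex with
  | nil =>
    intro _
    exact ⟨hg, by simp⟩
  | cons p t ih =>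
    intro hL
    obtain ⟨hp1, hp2, hp3, hp4⟩ := hL p List.mem_cons_self
    obtain ⟨hg1, hO1, hm1⟩ := step_spec r c inv g ex p.1 p.2 hp1 hp2 hp3 hp4 hg hexO
    simp only [List.foldl_cons]
    have hstep : explodeStep r c (g, ex) p.1 p.2
        = ((explodeStep r c (g, ex) p.1 p.2).1, (explodeStep r c (g, ex) p.1 p.2).2) := rfl
    rw [hstep]
    obtain ⟨hg2, hm2⟩ := ih (explodeStep r c (g, ex) p.1 p.2).1
      (explodeStep r c (g, ex) p.1 p.2).2 hg1 hO1
      (fun q hq => hL q (List.mem_cons_of_mem p hq))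
    refine ⟨hg2, fun x => ?_⟩
    rw [hm2 x]
    have hm1x := hm1 x
    constructor
    · rintro (hx | ⟨q, hq, hdq, hnb, hbx, hnex⟩)
      · rcases hm1x.mp hx with hx' | ⟨hd, hnb, hbx, hne, _⟩
        · exact Or.inl hx'
        · exact Or.inr ⟨p, List.mem_cons_self, hd, hnb, hbx, hne⟩
      · exact Or.inr ⟨q, List.mem_cons_of_mem p hq, hdq, hnb, hbx, hnex⟩
    · rintro (hx | ⟨q, hq, hdq, hnb, hbx, hnex⟩)
      · exact Or.inl (hm1x.mpr (Or.inl hx))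
      · rcases List.mem_cons.mp hq with rfl | hq'
        · by_cases hxe : x ∈ ex
          · exact Or.inl (hm1x.mpr (Or.inl hxe))
          · exact Or.inl (hm1x.mpr (Or.inr ⟨hdq, hnb, hbx, hnex, hxe⟩))
        · exact Or.inr ⟨q, hq', hdq, hnb, hbx, hnex⟩

lemma round_grid (r c : Int) (f : Int → Int → Char) :
    explodeAll r c (invertGrid r c f)
      = gridOf r c (fun i j => if boomB r c f i j then '.' else 'O') := by
  rw [explodeAll_cells, invertGrid_eq]
  have h0 : gridOf r c (fun i j => if f i j = 'O' then '.' else 'O')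
      = gridOf r c (FF (fun i j => if f i j = 'O' then '.' else 'O') []) := by
    apply gridOf_congr
    intro i j _ _ _ _
    unfold FF
    by_cases hf : f i j = 'O' <;> simp [hf]
  obtain ⟨hg, hmem⟩ := fold_cells r c (fun i j => if f i j = 'O' then '.' else 'O')
    (cells r c) (gridOf r c (fun i j => if f i j = 'O' then '.' else 'O')) [] h0 (by simp)
    (fun p hp => (mem_cells r c p).mp hp)
  rw [hg]
  apply gridOf_congr
  intro i j hi1 hi2 hj1 hj2
  unfold FF
  have hmx := hmem (i, j)
  have hcond : ((if f i j = 'O' then '.' else 'O') = '.' ∨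
      (i, j) ∈ (((cells r c).foldl (fun st p => explodeStep r c st p.1 p.2)
        (gridOf r c (fun i j => if f i j = 'O' then '.' else 'O'), [])).2))
      ↔ boomB r c f i j = true := by
    rw [hmx, boomB_iff]
    simp only [List.not_mem_nil, false_or]
    constructor
    · rintro (hd | ⟨q, hq, hdq, hnb, _, _⟩)
      · by_cases hf : f i j = 'O'
        · exact Or.inl hf
        · rw [if_neg hf] at hd; exact absurd hd (by decide)
      · refine Or.inr ⟨q, (mem_nbrs_comm q (i, j)).mp hnb, (mem_cells r c q).mp hq, ?_⟩
        by_cases hf : f q.1 q.2 = 'O'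
        · exact hf
        · rw [if_neg hf] at hdq; exact absurd hdq (by decide)
    · rintro (hf | ⟨x, hx, hbx, hfx⟩)
      · exact Or.inl (by rw [if_pos hf])
      · by_cases hf : f i j = 'O'
        · exact Or.inl (by rw [if_pos hf])
        · refine Or.inr ⟨x, (mem_cells r c x).mpr hbx, by rw [if_pos hfx], ?_, ?_, ?_⟩
          · exact (mem_nbrs_comm (i, j) x).mp hx
          · exact ⟨hi1, hi2, hj1, hj2⟩
          · rw [if_neg hf]; decide
  by_cases hb : boomB r c f i j = true
  · rw [if_pos (hcond.mpr hb), if_pos hb]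
  · rw [if_neg (fun hc => hb (hcond.mp hc)), if_neg hb]

lemma rowsToStrings_gridOf (r c : Int) (h : Int → Int → Char) :
    rowsToStrings r c (gridOf r c h)
      = (PySem.List.pyRange 0 r 1).map (fun i =>
          String.ofList ((PySem.List.pyRange 0 c 1).map (h i))) := by
  unfold rowsToStrings
  rw [PySem.List.foldl_append_singleton_eq_map]
  simp only [List.nil_append]
  apply List.map_congr_left
  intro i hi
  rw [PySem.List.mem_pyRange_one] at hi
  congr 1
  rw [PySem.List.foldl_append_singleton_eq_map]
  simp only [List.nil_append]
  apply List.map_congr_left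
  intro j hj
  rw [PySem.List.mem_pyRange_one] at hj
  exact cellC_gridOf r c h i j hi.1 hi.2 hj.1 hj.2

lemma cellS_stepB (r c : Int) (g : List String) (i j : Int)
    (h1 : 0 ≤ i) (h2 : i < r) (h3 : 0 ≤ j) (h4 : j < c) :
    cellS (stepB r c g) i j = (if safeB r c g i j then 'O' else '.') := by
  unfold cellS stepB
  rw [PySem.List.pyGetD_map_pyRange_of_nonneg _ r i "" h1 h2]
  rw [show (String.ofList ((PySem.List.pyRange 0 c 1).map
      (fun j => if safeB r c g i j then 'O' else '.'))).toList
      = (PySem.List.pyRange 0 c 1).map (fun j => if safeB r c g i j then 'O' else '.') by simp]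
  rw [PySem.List.pyGetD_map_pyRange_of_nonneg _ c j ' ' h3 h4]

lemma safeB_boom (r c : Int) (g : List String) (i j : Int)
    (h1 : 0 ≤ i) (h2 : i < r) (h3 : 0 ≤ j) (h4 : j < c) :
    (if boomB r c (fun a b => cellS g a b) i j then '.' else 'O')
      = (if safeB r c g i j then 'O' else '.') := by
  have hiff : boomB r c (fun a b => cellS g a b) i j = true ↔ safeB r c g i j = false := by
    rw [boomB_iff]
    unfold safeB
    constructor
    · rintro (hf | ⟨x, hx, hbx, hfx⟩)
      · rw [if_pos hf]
      · simp only [nbrs, List.mem_cons, List.not_mem_nil, or_false] at hx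
        obtain ⟨hb1, hb2, hb3, hb4⟩ := hbx
        rcases hx with rfl | rfl | rfl | rfl
        all_goals simp only at hfx hb1 hb2 hb3 hb4
        · by_cases hc0 : cellS g i j = 'O'
          · rw [if_pos hc0]
          · rw [if_neg hc0, if_pos ⟨by omega, hfx⟩]
        · by_cases hc0 : cellS g i j = 'O'
          · rw [if_pos hc0]
          · rw [if_neg hc0]
            by_cases hcA : 0 < i ∧ cellS g (i - 1) j = 'O'
            · rw [if_pos hcA]
            · rw [if_neg hcA, if_pos ⟨hb2, hfx⟩]
        · by_cases hc0 : cellS g i j = 'O'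
          · rw [if_pos hc0]
          · rw [if_neg hc0]
            by_cases hcA : 0 < i ∧ cellS g (i - 1) j = 'O'
            · rw [if_pos hcA]
            · rw [if_neg hcA]
              by_cases hcB : i + 1 < r ∧ cellS g (i + 1) j = 'O'
              · rw [if_pos hcB]
              · rw [if_neg hcB, if_pos ⟨by omega, hfx⟩]
        · by_cases hc0 : cellS g i j = 'O'
          · rw [if_pos hc0]
          · rw [if_neg hc0]
            by_cases hcA : 0 < i ∧ cellS g (i - 1) j = 'O'
            · rw [if_pos hcA]
            · rw [if_neg hcA]
              by_cases hcB : i + 1 < r ∧ cellS g (i + 1) j = 'O'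
              · rw [if_pos hcB]
              · rw [if_neg hcB]
                by_cases hcC : 0 < j ∧ cellS g i (j - 1) = 'O'
                · rw [if_pos hcC]
                · rw [if_neg hcC, if_pos ⟨hb4, hfx⟩]
    · intro hfalse
      by_cases hc0 : cellS g i j = 'O'
      · exact Or.inl hc0
      · rw [if_neg hc0] at hfalse
        by_cases hcA : 0 < i ∧ cellS g (i - 1) j = 'O'
        · exact Or.inr ⟨(i - 1, j), by simp [nbrs], ⟨by omega, by omega, h3, h4⟩, hcA.2⟩
        · rw [if_neg hcA] at hfalse
          by_cases hcB : i + 1 < r ∧ cellS g (i + 1) j = 'O'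
          · exact Or.inr ⟨(i + 1, j), by simp [nbrs], ⟨by omega, hcB.1, h3, h4⟩, hcB.2⟩
          · rw [if_neg hcB] at hfalse
            by_cases hcC : 0 < j ∧ cellS g i (j - 1) = 'O'
            · exact Or.inr ⟨(i, j - 1), by simp [nbrs], ⟨h1, h2, by omega, by omega⟩, hcC.2⟩
            · rw [if_neg hcC] at hfalse
              by_cases hcD : j + 1 < c ∧ cellS g i (j + 1) = 'O'
              · exact Or.inr ⟨(i, j + 1), by simp [nbrs], ⟨h1, h2, by omega, hcD.1⟩, hcD.2⟩
              · rw [if_neg hcD] at hfalse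
                exact absurd hfalse (by decide)
  by_cases hs : safeB r c g i j
  · rw [if_pos hs, if_neg (fun hb => by simp [hiff.mp hb] at hs)]
  · rw [if_pos (hiff.mpr (by simpa using hs)), if_neg hs]

lemma boomB_congr (r c : Int) (f f' : Int → Int → Char)
    (H : ∀ a b, 0 ≤ a → a < r → 0 ≤ b → b < c → f a b = f' a b) (i j : Int)
    (h1 : 0 ≤ i) (h2 : i < r) (h3 : 0 ≤ j) (h4 : j < c) :
    boomB r c f i j = boomB r c f' i j := by
  have key : ∀ (h h' : Int → Int → Char),
      (∀ a b, 0 ≤ a → a < r → 0 ≤ b → b < c → h a b = h' a b) →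
      boomB r c h i j = true → boomB r c h' i j = true := by
    intro h h' HH hb
    rw [boomB_iff] at hb ⊢
    rcases hb with hf | ⟨x, hx, hbx, hfx⟩
    · exact Or.inl (by rw [← HH i j h1 h2 h3 h4]; exact hf)
    · obtain ⟨hb1, hb2, hb3, hb4⟩ := hbx
      exact Or.inr ⟨x, hx, ⟨hb1, hb2, hb3, hb4⟩,
        by rw [← HH x.1 x.2 hb1 hb2 hb3 hb4]; exact hfx⟩
  cases hb : boomB r c f' i j
  · cases hb' : boomB r c f i j
    · rfl
    · exact absurd (key f f' H hb') (by simp [hb])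
  · exact key f' f (fun a b ha1 ha2 hb1 hb2 => (H a b ha1 ha2 hb1 hb2).symm) hb

-- one detonation round of A equals one pure step of B, as strings
lemma round_strings (r c : Int) (f : Int → Int → Char) (g : List String)
    (Hf : ∀ a b, 0 ≤ a → a < r → 0 ≤ b → b < c → f a b = cellS g a b) :
    rowsToStrings r c (explodeAll r c (invertGrid r c f)) = stepB r c g := by
  rw [round_grid, rowsToStrings_gridOf]
  unfold stepB
  apply List.map_congr_left
  intro i hi
  rw [PySem.List.mem_pyRange_one] at hi
  congr 1
  apply List.map_congr_left
  intro j hj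
  rw [PySem.List.mem_pyRange_one] at hj
  rw [boomB_congr r c f (fun a b => cellS g a b) Hf i j hi.1 hi.2 hj.1 hj.2]
  exact safeB_boom r c g i j hi.1 hi.2 hj.1 hj.2

lemma ab_eq (r c : Int) (n : Int) (grid : List String) :
    bomberMan r c n grid = bomberMan_alt r c n grid := by
  unfold bomberMan bomberMan_alt
  by_cases h1 : n = 1
  · rw [if_pos h1, if_pos h1]
  · rw [if_neg h1, if_neg h1]
    by_cases h2 : PySem.Int.mod n 4 = 2 ∨ PySem.Int.mod n 4 = 0
    · rw [if_pos h2, if_pos (Or.symm h2)]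
    · rw [if_neg h2, if_neg (fun h => h2 (Or.symm h))]
      dsimp only
      by_cases h3 : PySem.Int.mod n 4 = 3
      · rw [if_pos h3, if_pos h3]
        exact round_strings r c (fun i j => rowCh grid i j) grid
          (fun a b _ _ _ _ => rfl)
      · rw [if_neg h3, if_neg h3]
        have hfirst : ∀ a b, 0 ≤ a → a < r → 0 ≤ b → b < c →
            cellC (explodeAll r c (invertGrid r c (fun i j => rowCh grid i j))) a b
              = cellS (stepB r c grid) a b := by
          intro a b ha1 ha2 hb1 hb2
          rw [round_grid, cellC_gridOf r c _ a b ha1 ha2 hb1 hb2,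
            cellS_stepB r c grid a b ha1 ha2 hb1 hb2,
            boomB_congr r c (fun i j => rowCh grid i j) (fun i j => cellS grid i j)
              (fun a b _ _ _ _ => rfl) a b ha1 ha2 hb1 hb2]
          exact safeB_boom r c grid a b ha1 ha2 hb1 hb2
        exact round_strings r c
          (fun i j => cellC (explodeAll r c (invertGrid r c (fun i j => rowCh grid i j))) i j)
          (stepB r c grid) hfirst

-- ===== VERDICT (by name: the statement is the Claim_ definition above) =====
theorem bomberMan_spec : Claim_equal_bomberMan := by
  intro r c n grid _ _
  unfold Spec_bomberMan
  exact ab_eq r c n grid
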